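-- pv_equiv track=rewrite | github.com/xxibcill/cc-deep-reasearch | src/cc_deep_research/agents/ai_agent_integration.py | _parse_content_sources
-- ===== SOURCE A (Python) =====
-- def _parse_content_sources(content: str) -> list[dict[str, str]]:
--     """Parse source information from formatted content string.
--
--     Args:
--         content: Formatted content string with source markers.
--
--     Returns:
--         List of source dictionaries with url, title, content.
--     """
--     sources: list[dict[str, str]] = []
--     lines = content.split("\n")
--
--     current_source: dict[str, str] = {}
--
--     for line in lines:
--         line = line.strip()
--
--         if line.startswith("--- Source"):
--             if current_source:
--                 sources.append(current_source)
--             current_source = {}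
--         elif line.startswith("URL:"):
--             current_source["url"] = line.replace("URL:", "").strip()
--         elif line.startswith("Title:"):
--             current_source["title"] = line.replace("Title:", "").strip()
--         elif line.startswith("Content:"):
--             current_source["content"] = line.replace("Content:", "").strip()
--
--     if current_source:
--         sources.append(current_source)
--
--     return sources
-- ===== SOURCE B (Python) =====
-- def _parse_content_sources(content: str) -> list[dict[str, str]]:
--     """Two-phase: partition lines into groups at '--- Source' markers, then parse each group."""
--     lines = content.split("\n")
--     # phase 1: group lines between markers (lines before the first marker form the leading group)
--     groups: list[list[str]] = []
--     current: list[str] = []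
--     for line in lines:
--         if line.strip().startswith("--- Source"):
--             groups.append(current)
--             current = []
--         else:
--             current.append(line)
--     groups.append(current)
--     # phase 2: parse each group into a dict; keep only non-empty dicts
--     sources: list[dict[str, str]] = []
--     for group in groups:
--         source: dict[str, str] = {}
--         for raw in group:
--             line = raw.strip()
--             if line.startswith("URL:"):
--                 source["url"] = line.replace("URL:", "").strip()
--             elif line.startswith("Title:"):
--                 source["title"] = line.replace("Title:", "").strip()
--             elif line.startswith("Content:"):
--                 source["content"] = line.replace("Content:", "").strip()
--         if source:
--             sources.append(source)
--     return sources
-- ===== Notes on version B (the rewrite author's own statement) =====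
-- stated objective: alternative
-- what changed: Replaces A's single flush-on-marker scan carrying a half-built dict with a two-phase decomposition: first partition the lines into groups at the source-marker lines, then parse each group independently into a dict and keep the non-empty ones.
import Mathlib
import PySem

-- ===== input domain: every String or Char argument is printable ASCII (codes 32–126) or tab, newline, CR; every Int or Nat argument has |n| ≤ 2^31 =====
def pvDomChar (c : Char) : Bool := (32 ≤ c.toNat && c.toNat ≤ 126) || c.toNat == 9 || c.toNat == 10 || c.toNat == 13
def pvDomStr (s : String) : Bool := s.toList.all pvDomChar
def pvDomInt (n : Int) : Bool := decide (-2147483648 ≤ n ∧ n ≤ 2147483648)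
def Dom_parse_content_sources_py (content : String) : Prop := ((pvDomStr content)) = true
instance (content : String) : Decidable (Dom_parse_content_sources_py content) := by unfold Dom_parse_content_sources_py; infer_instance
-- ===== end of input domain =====

-- B replaces A's single flush-on-marker scan with a two-phase group-then-parse decomposition (objective: alternative; same cost).

-- ===== PORT A =====
-- A's loop body: strip the line, flush on a marker, otherwise update the current dict.
def pcsStepA (st : List (List (String × String)) × PySem.Dict String String) (line0 : String) :
    List (List (String × String)) × PySem.Dict String String :=
  let line := PySem.Str.strip line0
  if PySem.Str.startswith line "--- Source" then
    (if st.2.items.isEmpty then st.1 else st.1 ++ [st.2.items], PySem.Dict.empty)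
  else if PySem.Str.startswith line "URL:" then
    (st.1, st.2.insert "url" (PySem.Str.strip (PySem.Str.replace line "URL:" "")))
  else if PySem.Str.startswith line "Title:" then
    (st.1, st.2.insert "title" (PySem.Str.strip (PySem.Str.replace line "Title:" "")))
  else if PySem.Str.startswith line "Content:" then
    (st.1, st.2.insert "content" (PySem.Str.strip (PySem.Str.replace line "Content:" "")))
  else st

def parse_content_sources_py (content : String) : List (List (String × String)) :=
  let lines := (PySem.Str.split? content "\n").getD []
  let st := lines.foldl pcsStepA (([] : List (List (String × String))), (PySem.Dict.empty : PySem.Dict String String))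
  if st.2.items.isEmpty then st.1 else st.1 ++ [st.2.items]

-- ===== PORT B =====
-- B phase 1 loop body: start a new group at a marker line, else append the raw line to the current group.
def pcsGroupStep (p : List (List String) × List String) (line : String) :
    List (List String) × List String :=
  if PySem.Str.startswith (PySem.Str.strip line) "--- Source" then (p.1 ++ [p.2], [])
  else (p.1, p.2 ++ [line])

-- B phase 2 inner loop body: parse one raw line into the group's dict.
def pcsParseLine (d : PySem.Dict String String) (raw : String) : PySem.Dict String String :=
  let line := PySem.Str.strip raw
  if PySem.Str.startswith line "URL:" then
    d.insert "url" (PySem.Str.strip (PySem.Str.replace line "URL:" ""))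
  else if PySem.Str.startswith line "Title:" then
    d.insert "title" (PySem.Str.strip (PySem.Str.replace line "Title:" ""))
  else if PySem.Str.startswith line "Content:" then
    d.insert "content" (PySem.Str.strip (PySem.Str.replace line "Content:" ""))
  else d

def pcsParseGroup (g : List String) : PySem.Dict String String :=
  g.foldl pcsParseLine PySem.Dict.empty

-- B phase 2 outer loop body: keep the parsed dict if non-empty.
def pcsCollect (acc : List (List (String × String))) (g : List String) :
    List (List (String × String)) :=
  let d := pcsParseGroup g
  if d.items.isEmpty then acc else acc ++ [d.items]

def parse_content_sources_py_alt (content : String) : List (List (String × String)) :=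
  let lines := (PySem.Str.split? content "\n").getD []
  let p := lines.foldl pcsGroupStep (([] : List (List String)), ([] : List String))
  let groups := p.1 ++ [p.2]
  groups.foldl pcsCollect []

-- ===== PRECONDITION & SPEC =====
def Spec_parse_content_sources_py (content : String) (out : List (List (String × String))) : Prop := out = parse_content_sources_py_alt content
instance (content : String) (out : List (List (String × String))) : Decidable (Spec_parse_content_sources_py content out) := by unfold Spec_parse_content_sources_py; infer_instance

-- ===== CLAIM (what is proved, stated in full; the proofs are below) =====
def Claim_equal_parse_content_sources_py : Prop := ∀ (content : String), Dom_parse_content_sources_py content → Spec_parse_content_sources_py content (parse_content_sources_py content)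

-- ===== LEMMAS AND PROOFS =====
-- Common recursive characterisation of the result, recursing on the list of lines.
def pcsEmit (d : PySem.Dict String String) : List (List (String × String)) :=
  if d.items.isEmpty then [] else [d.items]

def pcsSpec : PySem.Dict String String → List String → List (List (String × String))
  | d, [] => pcsEmit d
  | d, l :: ls =>
    if PySem.Str.startswith (PySem.Str.strip l) "--- Source" then
      pcsEmit d ++ pcsSpec PySem.Dict.empty ls
    else
      pcsSpec (pcsParseLine d l) ls

lemma pcsParseGroup_nil : pcsParseGroup [] = PySem.Dict.empty := rfl

lemma pcsSpec_nil (d : PySem.Dict String String) : pcsSpec d [] = pcsEmit d := rfl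

lemma pcsSpec_cons_marker (d : PySem.Dict String String) (l : String) (ls : List String)
    (h : PySem.Str.startswith (PySem.Str.strip l) "--- Source" = true) :
    pcsSpec d (l :: ls) = pcsEmit d ++ pcsSpec PySem.Dict.empty ls := by
  simp only [pcsSpec]; rw [if_pos h]

lemma pcsSpec_cons_non (d : PySem.Dict String String) (l : String) (ls : List String)
    (h : PySem.Str.startswith (PySem.Str.strip l) "--- Source" = false) :
    pcsSpec d (l :: ls) = pcsSpec (pcsParseLine d l) ls := by
  simp only [pcsSpec]; rw [if_neg (by rw [h]; exact Bool.false_ne_true)]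

lemma pcsStepA_marker (st : List (List (String × String)) × PySem.Dict String String) (l : String)
    (h : PySem.Str.startswith (PySem.Str.strip l) "--- Source" = true) :
    pcsStepA st l = (st.1 ++ pcsEmit st.2, PySem.Dict.empty) := by
  unfold pcsStepA pcsEmit
  rw [if_pos h]
  split <;> simp_all

lemma pcsStepA_nonmarker (st : List (List (String × String)) × PySem.Dict String String) (l : String)
    (h : PySem.Str.startswith (PySem.Str.strip l) "--- Source" = false) :
    pcsStepA st l = (st.1, pcsParseLine st.2 l) := by
  unfold pcsStepA pcsParseLine
  simp only [h, Bool.false_eq_true, if_false]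
  split_ifs <;> rfl

lemma lemA : ∀ (ls : List String) (S : List (List (String × String))) (d : PySem.Dict String String),
    (ls.foldl pcsStepA (S, d)).1 ++ pcsEmit (ls.foldl pcsStepA (S, d)).2 = S ++ pcsSpec d ls := by
  intro ls
  induction ls with
  | nil => intro S d; simp [pcsSpec_nil]
  | cons l ls ih =>
    intro S d
    by_cases h : PySem.Str.startswith (PySem.Str.strip l) "--- Source" = true
    · rw [List.foldl_cons, pcsStepA_marker (S, d) l h, ih, pcsSpec_cons_marker _ _ _ h,
        List.append_assoc]
    · simp only [Bool.not_eq_true] at h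
      rw [List.foldl_cons, pcsStepA_nonmarker (S, d) l h, ih, pcsSpec_cons_non _ _ _ h]

lemma pcsCollect_eq (acc : List (List (String × String))) (g : List String) :
    pcsCollect acc g = acc ++ pcsEmit (pcsParseGroup g) := by
  unfold pcsCollect pcsEmit
  split <;> simp_all

lemma pcsCollect_snoc (gs : List (List String)) (cur : List String) :
    (gs ++ [cur]).foldl pcsCollect [] = gs.foldl pcsCollect [] ++ pcsEmit (pcsParseGroup cur) := by
  rw [List.foldl_append, List.foldl_cons, List.foldl_nil, pcsCollect_eq]

lemma lemB : ∀ (ls : List String) (gs : List (List String)) (cur : List String),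
    ((ls.foldl pcsGroupStep (gs, cur)).1 ++ [(ls.foldl pcsGroupStep (gs, cur)).2]).foldl pcsCollect []
      = gs.foldl pcsCollect [] ++ pcsSpec (pcsParseGroup cur) ls := by
  intro ls
  induction ls with
  | nil =>
    intro gs cur
    rw [List.foldl_nil, pcsCollect_snoc, pcsSpec_nil]
  | cons l ls ih =>
    intro gs cur
    by_cases h : PySem.Str.startswith (PySem.Str.strip l) "--- Source" = true
    · have hstep : pcsGroupStep (gs, cur) l = (gs ++ [cur], []) := by
        unfold pcsGroupStep; rw [if_pos h]
      rw [List.foldl_cons, hstep, ih, pcsParseGroup_nil, pcsCollect_snoc,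
        pcsSpec_cons_marker _ _ _ h, List.append_assoc]
    · simp only [Bool.not_eq_true] at h
      have hstep : pcsGroupStep (gs, cur) l = (gs, cur ++ [l]) := by
        unfold pcsGroupStep; rw [if_neg (by rw [h]; exact Bool.false_ne_true)]
      have hpg : pcsParseGroup (cur ++ [l]) = pcsParseLine (pcsParseGroup cur) l := by
        unfold pcsParseGroup; rw [List.foldl_append, List.foldl_cons, List.foldl_nil]
      rw [List.foldl_cons, hstep, ih, hpg, pcsSpec_cons_non _ _ _ h]

-- ===== VERDICT (by name: the statement is the Claim_ definition above) =====
theorem parse_content_sources_py_spec : Claim_equal_parse_content_sources_py := by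
  intro content _
  unfold Spec_parse_content_sources_py parse_content_sources_py parse_content_sources_py_alt
  have hA := lemA ((PySem.Str.split? content "\n").getD []) [] PySem.Dict.empty
  have hB := lemB ((PySem.Str.split? content "\n").getD []) [] []
  rw [pcsParseGroup_nil] at hB
  simp only [List.nil_append] at hA hB
  rw [hB, ← hA]
  unfold pcsEmit
  split <;> simp_all
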